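-- pv_equiv track=rewrite | github.com/andlamb2002/lambro-trainer-v2 | src/scripts/utils.py | merge_adjacent_u_moves
-- ===== SOURCE A (Python) =====
-- def _move_to_int(move: str) -> int | None:
--     if move == 'U': return 1
--     if move == 'U2': return 2
--     if move == "U'": return 3
--     return None
--
-- def _int_to_move(i: int) -> str:
--     if i == 1: return 'U'
--     if i == 2: return 'U2'
--     if i == 3: return "U'"
--     return ''
--
-- def merge_adjacent_u_moves(moves_list: list[str]) -> list[str]:
--     result = []
--     i = 0
--     while i < len(moves_list):
--         move = moves_list[i]
--         if move and move[0] == 'U':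
--             total = _move_to_int(move) or 0
--             i += 1
--             while i < len(moves_list) and moves_list[i] and moves_list[i][0] == 'U':
--                 val = _move_to_int(moves_list[i])
--                 if val is not None:
--                     total = (total + val) % 4
--                 i += 1
--             if total != 0:
--                 result.append(_int_to_move(total))
--         else:
--             result.append(move)
--             i += 1
--     return result
-- ===== SOURCE B (Python) =====
-- def _move_to_int(move: str) -> int | None:
--     if move == 'U': return 1
--     if move == 'U2': return 2
--     if move == "U'": return 3
--     return None
--
-- def _int_to_move(i: int) -> str:
--     if i == 1: return 'U'
--     if i == 2: return 'U2'
--     if i == 3: return "U'"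
--     return ''
--
-- def merge_adjacent_u_moves(moves_list: list[str]) -> list[str]:
--     stack = []
--     for move in moves_list:
--         if move and move[0] == 'U':
--             v = _move_to_int(move) or 0
--             if stack and stack[-1] and stack[-1][0] == 'U':
--                 v = (v + (_move_to_int(stack.pop()) or 0)) % 4
--             if v:
--                 stack.append(_int_to_move(v))
--         else:
--             stack.append(move)
--     return stack
-- ===== Notes on version B (the rewrite author's own statement) =====
-- stated objective: alternative
-- what changed: Replaces A's nested run-scanning while loops by a single stack pass: each U-prefixed move is merged with the previous output element (pop, add mod 4, re-encode), so runs are never scanned and no run accumulator is kept.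
import Mathlib
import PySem

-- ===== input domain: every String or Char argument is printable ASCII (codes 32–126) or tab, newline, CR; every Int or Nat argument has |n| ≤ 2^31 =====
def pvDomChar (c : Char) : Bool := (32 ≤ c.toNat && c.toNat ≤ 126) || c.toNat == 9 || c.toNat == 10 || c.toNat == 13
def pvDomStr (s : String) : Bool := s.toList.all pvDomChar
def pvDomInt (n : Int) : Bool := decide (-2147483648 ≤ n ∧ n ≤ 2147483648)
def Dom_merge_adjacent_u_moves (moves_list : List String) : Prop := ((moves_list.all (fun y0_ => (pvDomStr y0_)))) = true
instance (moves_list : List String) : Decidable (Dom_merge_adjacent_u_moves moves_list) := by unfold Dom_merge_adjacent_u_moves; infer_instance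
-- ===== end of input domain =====

-- B replaces A's nested run-scanning loops by a single stack pass that merges each
-- U-prefixed move with the previous output element (pop, add mod 4, re-encode);
-- objective: alternative (same cost, different algorithm).

-- ===== PORT A =====

-- _move_to_int
def pvMoveToInt (move : String) : Option Int :=
  if move = "U" then some 1
  else if move = "U2" then some 2
  else if move = "U'" then some 3
  else none

-- _int_to_move
def pvIntToMove (i : Int) : String :=
  if i = 1 then "U"
  else if i = 2 then "U2"
  else if i = 3 then "U'"
  else ""

-- 'move and move[0] == 'U'' (empty string is falsy)
def pvIsU (m : String) : Bool :=
  match m.toList with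
  | 'U' :: _ => true
  | _ => false

-- inner while loop of A: consume U-prefixed moves, updating total
def pvInnerA : List String → Int → Int × List String
  | [], total => (total, [])
  | m :: rest, total =>
      if pvIsU m then
        match pvMoveToInt m with
        | some v => pvInnerA rest ((total + v) % 4)
        | none => pvInnerA rest total
      else (total, m :: rest)

theorem pvInnerA_len (xs : List String) (t : Int) : (pvInnerA xs t).2.length ≤ xs.length := by
  induction xs generalizing t with
  | nil => simp [pvInnerA]
  | cons m rest ih =>
      simp only [pvInnerA]
      split
      · split
        · exact le_trans (ih _) (Nat.le_succ _)
        · exact le_trans (ih _) (Nat.le_succ _)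
      · simp

-- outer while loop of A
def merge_adjacent_u_moves (moves_list : List String) : List String :=
  match moves_list with
  | [] => []
  | move :: rest =>
      if pvIsU move then
        let t0 : Int := (pvMoveToInt move).getD 0   -- '_move_to_int(move) or 0'
        let p := pvInnerA rest t0
        (if p.1 ≠ 0 then [pvIntToMove p.1] else []) ++ merge_adjacent_u_moves p.2
      else move :: merge_adjacent_u_moves rest
termination_by moves_list.length
decreasing_by
  · exact Nat.lt_succ_of_le (pvInnerA_len rest t0)
  · simp

-- ===== PORT B =====

-- one iteration of B's loop; the Lean stack keeps its top at the HEAD (Python's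
-- stack[-1]/pop/append become head/tail/cons), so the final result is reversed
def pvStep (stack : List String) (move : String) : List String :=
  if pvIsU move then
    let v := (pvMoveToInt move).getD 0              -- '_move_to_int(move) or 0'
    match stack with
    | t :: rest =>
        if pvIsU t then                             -- 'stack and stack[-1] and stack[-1][0] == 'U''
          let v' := (v + (pvMoveToInt t).getD 0) % 4
          if v' ≠ 0 then pvIntToMove v' :: rest else rest
        else if v ≠ 0 then pvIntToMove v :: stack else stack
    | [] => if v ≠ 0 then pvIntToMove v :: stack else stack
  else move :: stack

def merge_adjacent_u_moves_alt (moves_list : List String) : List String :=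
  (moves_list.foldl pvStep []).reverse

-- ===== PRECONDITION & SPEC =====
def Spec_merge_adjacent_u_moves (moves_list : List String) (out : List String) : Prop := out = merge_adjacent_u_moves_alt moves_list
instance (moves_list : List String) (out : List String) : Decidable (Spec_merge_adjacent_u_moves moves_list out) := by unfold Spec_merge_adjacent_u_moves; infer_instance

-- ===== CLAIM (what is proved, stated in full; the proofs are below) =====
def Claim_equal_merge_adjacent_u_moves : Prop := ∀ (moves_list : List String), Dom_merge_adjacent_u_moves moves_list → Spec_merge_adjacent_u_moves moves_list (merge_adjacent_u_moves moves_list)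

-- ===== LEMMAS AND PROOFS =====

-- common reference form: merge by maximal runs (proof-only helper)
def pvRunMerge : List String → List String
  | [] => []
  | x :: xs =>
      if pvIsU x then
        let total := (((x :: xs.takeWhile pvIsU).map (fun m => (pvMoveToInt m).getD 0)).sum) % 4
        (if total ≠ 0 then [pvIntToMove total] else []) ++ pvRunMerge (xs.dropWhile pvIsU)
      else x :: pvRunMerge xs
termination_by xs => xs.length
decreasing_by
  · exact Nat.lt_succ_of_le (List.length_dropWhile_le _ _)
  · simp

-- recognized values are 0..3
theorem pvMoveToIntD_bounds (m : String) : 0 ≤ (pvMoveToInt m).getD 0 ∧ (pvMoveToInt m).getD 0 < 4 := by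
  unfold pvMoveToInt
  split_ifs <;> simp

-- A's inner loop computes, from an accumulator in [0,4), the run sum mod 4 and the rest
theorem pvInnerA_spec (xs : List String) (t : Int) (h0 : 0 ≤ t) (h4 : t < 4) :
    pvInnerA xs t = ((t + ((xs.takeWhile pvIsU).map (fun m => (pvMoveToInt m).getD 0)).sum) % 4,
                     xs.dropWhile pvIsU) := by
  induction xs generalizing t with
  | nil => simp [pvInnerA]; omega
  | cons m rest ih =>
      by_cases hU : pvIsU m
      · have hb := pvMoveToIntD_bounds m
        simp only [pvInnerA, hU, if_pos, List.takeWhile_cons, List.dropWhile_cons]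
        cases hv : pvMoveToInt m with
        | none =>
            rw [ih t h0 h4]
            simp [hv]
        | some v =>
            have hv' : (pvMoveToInt m).getD 0 = v := by simp [hv]
            dsimp only
            rw [ih ((t + v) % 4) (Int.emod_nonneg _ (by norm_num)) (Int.emod_lt_of_pos _ (by norm_num))]
            simp only [hv', List.map_cons, List.sum_cons, Prod.mk.injEq]
            exact ⟨by omega, trivial⟩
      · simp [pvInnerA, hU]
        omega

-- A equals the run-merged reference form
theorem pvA_eq_run (moves_list : List String) :
    merge_adjacent_u_moves moves_list = pvRunMerge moves_list := by
  induction moves_list using pvRunMerge.induct with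
  | case1 => simp [merge_adjacent_u_moves, pvRunMerge]
  | case2 x xs hU ih =>
      have hb := pvMoveToIntD_bounds x
      rw [merge_adjacent_u_moves, pvRunMerge]
      simp only [hU, if_pos]
      rw [pvInnerA_spec xs ((pvMoveToInt x).getD 0) hb.1 hb.2, ih]
      simp
  | case3 x xs hU ih =>
      rw [merge_adjacent_u_moves, pvRunMerge]
      simp [hU, ih]

-- B-side proof helpers: stack shape during a run, and 'clean' stacks (top not U-prefixed)
def pvS (t : Int) (s : List String) : List String :=
  (if t ≠ 0 then [pvIntToMove t] else []) ++ s

def pvClean : List String → Bool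
  | [] => true
  | h :: _ => !pvIsU h

-- round-trip for nonzero totals
theorem pvRound (t : Int) (h0 : 0 ≤ t) (h4 : t < 4) (ht : t ≠ 0) :
    (pvMoveToInt (pvIntToMove t)).getD 0 = t ∧ pvIsU (pvIntToMove t) = true := by
  interval_cases t
  · exact absurd rfl ht
  · constructor <;> decide
  · constructor <;> decide
  · constructor <;> decide

-- the head of a dropWhile result fails the predicate
theorem pv_dropWhile_head (p : String → Bool) : ∀ (xs : List String) (y : String) (ys : List String),
    xs.dropWhile p = y :: ys → p y = false := by
  intro xs
  induction xs with
  | nil => intro y ys h; simp at h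
  | cons a l ih =>
      intro y ys h
      by_cases hp : p a
      · rw [List.dropWhile_cons_of_pos hp] at h
        exact ih y ys h
      · rw [List.dropWhile_cons_of_neg hp] at h
        injection h with h1 h2
        subst h1
        simpa using hp

-- one U-step on a run stack adds the move's value mod 4
theorem pvStep_S (t : Int) (s : List String) (x : String) (h0 : 0 ≤ t) (h4 : t < 4)
    (hc : pvClean s = true) (hU : pvIsU x = true) :
    pvStep (pvS t s) x = pvS ((t + (pvMoveToInt x).getD 0) % 4) s := by
  have hb := pvMoveToIntD_bounds x
  by_cases ht : t = 0
  · subst ht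
    have hv4 : (0 + (pvMoveToInt x).getD 0) % 4 = (pvMoveToInt x).getD 0 := by omega
    rw [hv4]
    cases s with
    | nil => by_cases hz : (pvMoveToInt x).getD 0 = 0 <;> simp [pvS, pvStep, hU, hz]
    | cons h rest =>
        have hh : pvIsU h = false := by simpa [pvClean] using hc
        by_cases hz : (pvMoveToInt x).getD 0 = 0 <;> simp [pvS, pvStep, hU, hh, hz]
  · have hr := pvRound t h0 h4 ht
    have hS : pvS t s = pvIntToMove t :: s := by simp [pvS, ht]
    rw [hS]
    simp only [pvStep, hU, if_pos, hr.2, hr.1]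
    have hcomm : ((pvMoveToInt x).getD 0 + t) % 4 = (t + (pvMoveToInt x).getD 0) % 4 := by ring_nf
    rw [hcomm]
    by_cases hz : (t + (pvMoveToInt x).getD 0) % 4 = 0 <;> simp [pvS, hz]

-- consuming a run from stack state pvS t s
theorem pvFold_run (xs : List String) (t : Int) (s : List String)
    (h0 : 0 ≤ t) (h4 : t < 4) (hc : pvClean s = true) :
    List.foldl pvStep (pvS t s) xs
      = List.foldl pvStep
          (pvS ((t + ((xs.takeWhile pvIsU).map (fun m => (pvMoveToInt m).getD 0)).sum) % 4) s)
          (xs.dropWhile pvIsU) := by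
  induction xs generalizing t with
  | nil =>
      simp only [List.takeWhile_nil, List.dropWhile_nil, List.map_nil, List.sum_nil]
      have : (t + 0) % 4 = t := by omega
      rw [this]
  | cons x xs ih =>
      by_cases hU : pvIsU x
      · have hb := pvMoveToIntD_bounds x
        simp only [List.takeWhile_cons, List.dropWhile_cons, hU, if_pos, List.foldl_cons,
          List.map_cons, List.sum_cons]
        rw [pvStep_S t s x h0 h4 hc hU]
        rw [ih _ (by omega) (by omega)]
        have : ((t + (pvMoveToInt x).getD 0) % 4
                  + ((xs.takeWhile pvIsU).map (fun m => (pvMoveToInt m).getD 0)).sum) % 4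
             = (t + ((pvMoveToInt x).getD 0
                  + ((xs.takeWhile pvIsU).map (fun m => (pvMoveToInt m).getD 0)).sum)) % 4 := by
          omega
        rw [this]
      · have hU' : pvIsU x = false := by simpa using hU
        simp only [List.takeWhile_cons, List.dropWhile_cons, hU', Bool.false_eq_true,
          if_false, List.map_nil, List.sum_nil, Int.add_zero]
        have : t % 4 = t := by omega
        rw [this]

-- the fold from any clean stack produces the run-merged output (reversed) on top
theorem pvFold_clean : ∀ (n : Nat) (xs s : List String), xs.length ≤ n → pvClean s = true →
    List.foldl pvStep s xs = (pvRunMerge xs).reverse ++ s := by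
  intro n
  induction n with
  | zero =>
      intro xs s hn _
      have : xs = [] := List.eq_nil_of_length_eq_zero (Nat.le_zero.mp hn)
      subst this
      simp [pvRunMerge]
  | succ n ih =>
      intro xs s hn hc
      cases xs with
      | nil => simp [pvRunMerge]
      | cons x xs =>
          by_cases hU : pvIsU x
          · have hb := pvMoveToIntD_bounds x
            have hS0 : s = pvS 0 s := by simp [pvS]
            rw [List.foldl_cons, hS0, pvStep_S 0 s x (by omega) (by omega) hc hU]
            rw [pvFold_run xs _ s (by omega) (by omega) hc]
            set T := ((0 + (pvMoveToInt x).getD 0) % 4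
              + ((xs.takeWhile pvIsU).map (fun m => (pvMoveToInt m).getD 0)).sum) % 4 with hT
            have hTrun : T = (((x :: xs.takeWhile pvIsU).map (fun m => (pvMoveToInt m).getD 0)).sum) % 4 := by
              simp only [List.map_cons, List.sum_cons, hT]
              omega
            rw [pvRunMerge]
            simp only [hU, if_pos, ← hTrun]
            cases hdw : xs.dropWhile pvIsU with
            | nil =>
                simp only [List.foldl_nil, pvS, List.reverse_append]
                by_cases hz : T = 0 <;> simp [pvRunMerge, hz]
            | cons y ys =>
                have hy : pvIsU y = false := pv_dropWhile_head pvIsU xs y ys hdw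
                have hstep : pvStep (pvS T s) y = y :: pvS T s := by
                  simp [pvStep, hy]
                rw [List.foldl_cons, hstep]
                have hlen : ys.length ≤ n := by
                  have h1 : (xs.dropWhile pvIsU).length ≤ xs.length := List.length_dropWhile_le _ _
                  rw [hdw] at h1
                  simp only [List.length_cons] at h1 hn
                  omega
                rw [ih ys (y :: pvS T s) hlen (by simp [pvClean, hy])]
                have hrm : pvRunMerge (y :: ys) = y :: pvRunMerge ys := by
                  rw [pvRunMerge]; simp [hy]
                rw [hrm]
                by_cases hz : T = 0 <;> simp [pvS, hz]
          · rw [List.foldl_cons]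
            have hstep : pvStep s x = x :: s := by simp [pvStep, hU]
            rw [hstep, ih xs (x :: s) (by simp at hn; omega) (by simp [pvClean, hU])]
            rw [pvRunMerge]
            simp [hU]

theorem pv_equal (moves_list : List String) :
    merge_adjacent_u_moves moves_list = merge_adjacent_u_moves_alt moves_list := by
  rw [pvA_eq_run, merge_adjacent_u_moves_alt,
    pvFold_clean moves_list.length moves_list [] le_rfl rfl]
  simp

-- ===== VERDICT (by name: the statement is the Claim_ definition above) =====
theorem merge_adjacent_u_moves_spec : Claim_equal_merge_adjacent_u_moves := by
  intro moves_list _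
  unfold Spec_merge_adjacent_u_moves
  exact pv_equal moves_list
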